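-- pv_equiv track=rewrite | github.com/Generative-Dialogs/Kuznetsov-Promyshlyaev | src/Actor/DialogActor/DialogActor.py | parse_text_to_speech
-- ===== SOURCE A (Python) =====
-- from typing import List, Dict, Optional, Tuple
--
-- def parse_text_to_speech(text: str) -> List[Tuple[str, str]]:
--     """!
--     @brief Разбор текста на список кортежей (говорящий, текст)
--
--     @param text Текст для разбора
--
--     @return List[Tuple[str, str]] Список кортежей (говорящий, текст)
--
--     @details
--     Разбирает текст на части, определяя прямую речь и обычный текст.
--     Для прямой речи возвращает (имя персонажа, текст),
--     для обычного текста возвращает ("GM", текст).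
--     """
--     result = []
--     current_pos = 0
--
--     while current_pos < len(text):
--         # Ищем открывающую фигурную скобку
--         open_brace = text.find('{', current_pos)
--
--         # Если нашли открывающую скобку
--         if open_brace != -1:
--             # Добавляем текст до скобки как GM текст
--             if open_brace > current_pos:
--                 gm_text = text[current_pos:open_brace].strip()
--                 if gm_text:
--                     result.append(("GM", gm_text))
--
--             # Ищем закрывающую скобку
--             close_brace = text.find('}', open_brace)
--             if close_brace == -1:
--                 # Если не нашли закрывающую скобку, добавляем оставшийся текст как GM
--                 remaining = text[open_brace:].strip()
--                 if remaining:
--                     result.append(("GM", remaining))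
--                 break
--
--             # Извлекаем содержимое между скобками
--             content = text[open_brace + 1:close_brace].strip()
--
--             # Разбиваем на имя и текст по точке с запятой
--             parts = content.split(';', 1)
--             if len(parts) == 2:
--                 name = parts[0].strip().strip('[]')  # Убираем квадратные скобки
--                 speech = parts[1].strip()  # Убираем кавычки
--                 result.append((name, speech))
--
--             current_pos = close_brace + 1
--         else:
--             # Если не нашли открывающую скобку, добавляем оставшийся текст как GM
--             remaining = text[current_pos:].strip()
--             if remaining:
--                 result.append(("GM", remaining))
--             break
--
--     return result
-- ===== SOURCE B (Python) =====
-- def parse_text_to_speech(text):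
--     """Single character-by-character state-machine pass instead of find()-and-jump."""
--     result = []
--     buf = []
--     in_block = False
--     for ch in text:
--         if in_block:
--             if ch == '}':
--                 parts = ''.join(buf).strip().split(';', 1)
--                 if len(parts) == 2:
--                     name, speech = parts
--                     result.append((name.strip().strip('[]'), speech.strip()))
--                 buf = []
--                 in_block = False
--             else:
--                 buf.append(ch)
--         elif ch == '{':
--             gm = ''.join(buf).strip()
--             if gm:
--                 result.append(('GM', gm))
--             buf = []
--             in_block = True
--         else:
--             buf.append(ch)
--     rem = ('{' + ''.join(buf)).strip() if in_block else ''.join(buf).strip()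
--     if rem:
--         result.append(('GM', rem))
--     return result
-- ===== Notes on version B (the rewrite author's own statement) =====
-- stated objective: alternative
-- what changed: Replaced the find()-based index-jumping while-loop over positions by a single character-by-character state-machine pass that accumulates a buffer and switches between outside/inside-braces modes.
import Mathlib
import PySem

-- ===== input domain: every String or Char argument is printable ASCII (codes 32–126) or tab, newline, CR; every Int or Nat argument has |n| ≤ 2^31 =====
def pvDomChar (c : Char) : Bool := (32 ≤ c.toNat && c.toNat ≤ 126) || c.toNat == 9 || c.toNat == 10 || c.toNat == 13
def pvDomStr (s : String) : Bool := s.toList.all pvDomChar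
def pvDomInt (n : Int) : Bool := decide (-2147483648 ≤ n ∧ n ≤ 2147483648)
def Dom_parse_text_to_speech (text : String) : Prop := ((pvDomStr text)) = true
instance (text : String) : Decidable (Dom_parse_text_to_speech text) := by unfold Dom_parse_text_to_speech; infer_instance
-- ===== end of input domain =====

-- B replaces A's find()-and-jump position loop by a single char-by-char state-machine pass (alternative decomposition, same O(n) cost; equal return values).


-- ===== PORT A =====
-- A's while-loop over current_pos, transliterated as recursion over the suffix
-- text[current_pos:] (rest); find/slice indices are relative to that suffix.
def pvGoA (rest : List Char) (acc : List (String × String)) : List (String × String) :=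
  if _hr : rest = [] then acc
  else
    let ob := PySem.Chars.find rest ['{']
    if ob ≠ -1 then
      let acc1 := if ob > 0 then
          (let gm := PySem.Chars.strip (rest.take ob.toNat)
           if gm ≠ [] then acc ++ [("GM", String.ofList gm)] else acc)
        else acc
      let after := rest.drop ob.toNat
      let cb := PySem.Chars.find after ['}']
      if cb = -1 then
        let remaining := PySem.Chars.strip after
        if remaining ≠ [] then acc1 ++ [("GM", String.ofList remaining)] else acc1
      else
        let content := PySem.Chars.strip ((after.take cb.toNat).drop 1)
        let parts := PySem.Chars.splitOnMax content [';'] 1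
        let acc2 := if parts.length = 2 then
            let name := PySem.Chars.stripChars (PySem.Chars.strip parts[0]!) ['[', ']']
            let speech := PySem.Chars.strip parts[1]!
            acc1 ++ [(String.ofList name, String.ofList speech)]
          else acc1
        pvGoA (after.drop (cb.toNat + 1)) acc2
    else
      let remaining := PySem.Chars.strip rest
      if remaining ≠ [] then acc ++ [("GM", String.ofList remaining)] else acc
termination_by rest.length
decreasing_by
  simp only [List.length_drop]
  have : rest.length ≠ 0 := by simpa [List.length_eq_zero_iff] using _hr
  omega

def parse_text_to_speech (text : String) : List (String × String) :=
  pvGoA text.toList []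

-- ===== PORT B =====
-- one step of B's character state machine: state = (result, buf, in_block)
def pvStepB (st : List (String × String) × List Char × Bool) (ch : Char) :
    List (String × String) × List Char × Bool :=
  let (result, buf, inBlock) := st
  if inBlock then
    if ch = '}' then
      let parts := PySem.Chars.splitOnMax (PySem.Chars.strip buf) [';'] 1
      let result := if parts.length = 2 then
          result ++ [(String.ofList (PySem.Chars.stripChars (PySem.Chars.strip parts[0]!) ['[', ']']),
                      String.ofList (PySem.Chars.strip parts[1]!))]
        else result
      (result, [], false)
    else (result, buf ++ [ch], inBlock)
  else if ch = '{' then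
    let gm := PySem.Chars.strip buf
    let result := if gm ≠ [] then result ++ [("GM", String.ofList gm)] else result
    (result, [], true)
  else (result, buf ++ [ch], inBlock)

def parse_text_to_speech_alt (text : String) : List (String × String) :=
  let st := text.toList.foldl pvStepB ([], [], false)
  let rem := if st.2.2 then PySem.Chars.strip ('{' :: st.2.1) else PySem.Chars.strip st.2.1
  if rem ≠ [] then st.1 ++ [("GM", String.ofList rem)] else st.1

-- ===== PRECONDITION & SPEC =====
def Spec_parse_text_to_speech (text : String) (out : List (String × String)) : Prop := out = parse_text_to_speech_alt text
instance (text : String) (out : List (String × String)) : Decidable (Spec_parse_text_to_speech text out) := by unfold Spec_parse_text_to_speech; infer_instance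

-- ===== CLAIM (what is proved, stated in full; the proofs are below) =====
def Claim_equal_parse_text_to_speech : Prop := ∀ (text : String), Dom_parse_text_to_speech text → Spec_parse_text_to_speech text (parse_text_to_speech text)

-- ===== LEMMAS AND PROOFS =====

-- appending a GM chunk if nonempty (shape shared by both ports)
def pvEmitGM (acc : List (String × String)) (g : List Char) : List (String × String) :=
  if g ≠ [] then acc ++ [("GM", String.ofList g)] else acc

-- processing the inside of a brace block (shape shared by both ports)
def pvProcBlk (acc : List (String × String)) (content : List Char) : List (String × String) :=
  let parts := PySem.Chars.splitOnMax (PySem.Chars.strip content) [';'] 1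
  if parts.length = 2 then
    acc ++ [(String.ofList (PySem.Chars.stripChars (PySem.Chars.strip parts[0]!) ['[', ']']),
             String.ofList (PySem.Chars.strip parts[1]!))]
  else acc

-- B's final flush
def pvFinishB (st : List (String × String) × List Char × Bool) : List (String × String) :=
  let rem := if st.2.2 then PySem.Chars.strip ('{' :: st.2.1) else PySem.Chars.strip st.2.1
  if rem ≠ [] then st.1 ++ [("GM", String.ofList rem)] else st.1

lemma pv_singleton_prefix_iff (c : Char) (t : List Char) : [c] <+: t ↔ t[0]? = some c := by
  cases t with
  | nil => simp
  | cons a t => simp [List.cons_prefix_cons, eq_comm]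

lemma pv_find_single_neg (c : Char) (l : List Char) (h : c ∉ l) :
    PySem.Chars.find l [c] = -1 := by
  rw [PySem.Chars.find_eq_neg_one_iff]
  intro hinf
  exact h (hinf.subset (by simp))

lemma pv_find_single_of_split (c : Char) (l1 l2 : List Char) (h : c ∉ l1) :
    PySem.Chars.find (l1 ++ c :: l2) [c] = (l1.length : Int) := by
  have hnn : 0 ≤ PySem.Chars.find (l1 ++ c :: l2) [c] := by
    rw [PySem.Chars.find_nonneg_iff]
    exact ⟨l1, l2, by simp⟩
  obtain ⟨hpre, hmin⟩ := PySem.Chars.find_spec hnn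
  set f := PySem.Chars.find (l1 ++ c :: l2) [c] with hf
  rw [pv_singleton_prefix_iff] at hpre
  -- f.toNat ≤ l1.length since position l1.length works
  have hat : ((l1 ++ c :: l2).drop l1.length)[0]? = some c := by
    simp
  have hle : f.toNat ≤ l1.length := by
    by_contra hgt
    exact absurd ((pv_singleton_prefix_iff c _).mpr hat) (hmin l1.length (by omega))
  -- f.toNat ≥ l1.length since earlier positions are in l1
  have hge : l1.length ≤ f.toNat := by
    by_contra hlt
    rw [not_le] at hlt
    have : (l1 ++ c :: l2)[f.toNat]? = l1[f.toNat]? := by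
      rw [List.getElem?_append_left hlt]
    rw [List.getElem?_drop, Nat.add_zero] at hpre
    rw [this] at hpre
    exact h (List.mem_of_getElem? hpre)
  omega

lemma pv_exists_first_split (c : Char) (l : List Char) (h : c ∈ l) :
    ∃ l1 l2, l = l1 ++ c :: l2 ∧ c ∉ l1 := by
  induction l with
  | nil => cases h
  | cons a t ih =>
    by_cases ha : a = c
    · exact ⟨[], t, by simp [ha], by simp⟩
    · rcases ih (List.mem_of_ne_of_mem (Ne.symm ha) h) with ⟨l1, l2, rfl, hn⟩
      exact ⟨a :: l1, l2, rfl, by simp [hn]; exact fun hc => ha hc.symm⟩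

lemma pv_foldl_out (l : List Char) (acc : List (String × String)) (b : List Char)
    (h : '{' ∉ l) :
    l.foldl pvStepB (acc, b, false) = (acc, b ++ l, false) := by
  induction l generalizing b with
  | nil => simp
  | cons a t ih =>
    have ha : a ≠ '{' := fun hc => h (hc ▸ List.mem_cons_self)
    simp only [List.foldl_cons, pvStepB, if_neg ha, Bool.false_eq_true, if_false]
    rw [ih _ (fun hm => h (List.mem_cons_of_mem _ hm))]
    simp

lemma pv_foldl_in (l : List Char) (acc : List (String × String)) (b : List Char)
    (h : '}' ∉ l) :
    l.foldl pvStepB (acc, b, true) = (acc, b ++ l, true) := by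
  induction l generalizing b with
  | nil => simp
  | cons a t ih =>
    have ha : a ≠ '}' := fun hc => h (hc ▸ List.mem_cons_self)
    simp only [List.foldl_cons, pvStepB, if_neg ha, if_true]
    rw [ih _ (fun hm => h (List.mem_cons_of_mem _ hm))]
    simp

lemma pv_foldl_out_split (l1 l2 : List Char) (acc : List (String × String)) (b : List Char)
    (h : '{' ∉ l1) :
    (l1 ++ '{' :: l2).foldl pvStepB (acc, b, false)
      = l2.foldl pvStepB (pvEmitGM acc (PySem.Chars.strip (b ++ l1)), [], true) := by
  rw [List.foldl_append, pv_foldl_out l1 acc b h]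
  simp [pvStepB, pvEmitGM]

lemma pv_foldl_in_split (l1 l2 : List Char) (acc : List (String × String)) (b : List Char)
    (h : '}' ∉ l1) :
    (l1 ++ '}' :: l2).foldl pvStepB (acc, b, true)
      = l2.foldl pvStepB (pvProcBlk acc (b ++ l1), [], false) := by
  rw [List.foldl_append, pv_foldl_in l1 acc b h]
  simp [pvStepB, pvProcBlk]

lemma pv_strip_nil : PySem.Chars.strip ([] : List Char) = [] := rfl

lemma pvGoA_noopen (rest : List Char) (acc : List (String × String)) (h : '{' ∉ rest) :
    pvGoA rest acc = pvEmitGM acc (PySem.Chars.strip rest) := by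
  rw [pvGoA]
  by_cases hr : rest = []
  · subst hr; simp [pvEmitGM, pv_strip_nil]
  · simp only [hr, dite_false, pv_find_single_neg '{' rest h, pvEmitGM]
    simp

lemma pvGoA_noclose (l1 l2 : List Char) (acc : List (String × String))
    (h1 : '{' ∉ l1) (h2 : '}' ∉ l2) :
    pvGoA (l1 ++ '{' :: l2) acc
      = pvEmitGM (pvEmitGM acc (PySem.Chars.strip l1)) (PySem.Chars.strip ('{' :: l2)) := by
  rw [pvGoA]
  have hob := pv_find_single_of_split '{' l1 l2 h1
  have hcb : PySem.Chars.find (('{' :: l2)) ['}'] = -1 :=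
    pv_find_single_neg '}' _ (by simp [h2])
  have hdrop : (l1 ++ '{' :: l2).drop l1.length = '{' :: l2  := by simp
  have htake : (l1 ++ '{' :: l2).take l1.length = l1  := by simp
  simp only [hob, hdrop, htake, Int.toNat_natCast, hcb, pvEmitGM]
  by_cases hl1 : l1 = []
  · subst hl1; simp [pv_strip_nil]
  · have hpos : 0 < l1.length := List.length_pos_iff.mpr hl1
    have hposI : (0:Int) < (l1.length : Int) := by omega
    simp [hpos]

lemma pvGoA_step (l1 m1 m2 : List Char) (acc : List (String × String))
    (h1 : '{' ∉ l1) (h2 : '}' ∉ m1) :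
    pvGoA (l1 ++ '{' :: (m1 ++ '}' :: m2)) acc
      = pvGoA m2 (pvProcBlk (pvEmitGM acc (PySem.Chars.strip l1)) m1) := by
  rw [pvGoA]
  have hob := pv_find_single_of_split '{' l1 (m1 ++ '}' :: m2) h1
  have hdrop : (l1 ++ '{' :: (m1 ++ '}' :: m2)).drop l1.length = '{' :: (m1 ++ '}' :: m2) := by simp
  have htake : (l1 ++ '{' :: (m1 ++ '}' :: m2)).take l1.length = l1  := by simp
  have hcb : PySem.Chars.find ('{' :: (m1 ++ '}' :: m2)) ['}'] = ((m1.length + 1 : Nat) : Int) := by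
    have : '{' :: (m1 ++ '}' :: m2) = ('{' :: m1) ++ '}' :: m2 := by simp
    rw [this, pv_find_single_of_split '}' _ _ (by simp [h2])]
    simp
  have hneg1 : ¬ (((m1.length + 1 : Nat) : Int) = -1) := by omega
  have htake2 : ('{' :: (m1 ++ '}' :: m2)).take (m1.length + 1) = '{' :: m1 := by
    have : '{' :: (m1 ++ '}' :: m2) = ('{' :: m1) ++ '}' :: m2 := by simp
    rw [this]
    simp
  have hdrop2 : ('{' :: (m1 ++ '}' :: m2)).drop (m1.length + 1 + 1) = m2 := by
    have : '{' :: (m1 ++ '}' :: m2) = ('{' :: m1) ++ '}' :: m2 := by simp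
    rw [this, show m1.length + 1 + 1 = ('{' :: m1).length + 1 by simp]
    rw [List.drop_append]
    simp
  simp only [hob, hdrop, htake, Int.toNat_natCast, hcb, hneg1, htake2, hdrop2, pvEmitGM, pvProcBlk]
  by_cases hl1 : l1 = []
  · subst hl1; simp [pv_strip_nil]
  · have hpos : 0 < l1.length := List.length_pos_iff.mpr hl1
    have hposI : (0:Int) < (l1.length : Int) := by omega
    simp [hpos]

lemma pv_main (n : Nat) : ∀ (rest : List Char) (acc : List (String × String)),
    rest.length ≤ n →
    pvGoA rest acc = pvFinishB (rest.foldl pvStepB (acc, [], false)) := by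
  induction n with
  | zero =>
    intro rest acc hlen
    have hnil : rest = [] := List.eq_nil_of_length_eq_zero (Nat.le_zero.mp hlen)
    subst hnil
    rw [pvGoA]
    simp [pvFinishB, pv_strip_nil]
  | succ n ih =>
    intro rest acc hlen
    by_cases hmem : '{' ∈ rest
    · obtain ⟨l1, l2, rfl, h1⟩ := pv_exists_first_split '{' rest hmem
      by_cases hcl : '}' ∈ l2
      · obtain ⟨m1, m2, rfl, h2⟩ := pv_exists_first_split '}' l2 hcl
        rw [pvGoA_step l1 m1 m2 acc h1 h2, pv_foldl_out_split l1 _ acc [] h1,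
            pv_foldl_in_split m1 m2 _ [] h2]
        simp only [List.nil_append]
        refine ih m2 _ ?_
        simp only [List.length_append, List.length_cons] at hlen ⊢
        omega
      · rw [pvGoA_noclose l1 l2 acc h1 hcl, pv_foldl_out_split l1 l2 acc [] h1,
            pv_foldl_in l2 _ [] hcl]
        simp [pvFinishB, pvEmitGM]
    · rw [pvGoA_noopen rest acc hmem, pv_foldl_out rest acc [] hmem]
      simp [pvFinishB, pvEmitGM]

-- ===== VERDICT (by name: the statement is the Claim_ definition above) =====
theorem parse_text_to_speech_spec : Claim_equal_parse_text_to_speech := by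
  intro text _
  unfold Spec_parse_text_to_speech parse_text_to_speech parse_text_to_speech_alt
  exact pv_main text.toList.length text.toList [] le_rfl
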